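-- pv_equiv track=rewrite | github.com/MarcosBianchii/Teoria-de-Algoritmos | guias/reducciones/15.py | verificador_submarinos
-- ===== SOURCE A (Python) =====
-- def verificador_submarinos(matriz, k, faros):
--     """
--     La complejidad del verificador es O(n * m + s * f)
--     """
--     if len(faros) > k:
--         return False
--
--     n = len(matriz)
--     m = len(matriz[0])
--
--     def cubre(faro, submarino):
--         fx, fy = faro
--         sx, sy = submarino
--         rx, ry = fx - sx, fy - sy
--         return max(abs(rx), abs(ry)) <= 2
--
--     # O(n * m + s * f)
--     for i in range(n):
--         for j in range(m):
--             if matriz[i][j] == 1: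
--                 for faro in faros:
--                     if not cubre(faro, (i, j)):
--                         return False
--
--     return True
-- ===== SOURCE B (Python) =====
-- def verificador_submarinos(matriz, k, faros):
--     if len(faros) > k:
--         return False
--     # one pass: bounding box of all submarines, found row-by-row
--     box = None
--     for i, fila in enumerate(matriz):
--         if 1 in fila:
--             lo = fila.index(1)
--             hi = len(fila) - 1 - fila[::-1].index(1)
--             if box is None:
--                 box = (i, i, lo, hi)
--             else:
--                 imin, imax, jmin, jmax = box
--                 box = (min(imin, i), max(imax, i), min(jmin, lo), max(jmax, hi))
--     if box is None:
--         return True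
--     imin, imax, jmin, jmax = box
--     return all(fx - 2 <= imin and imax <= fx + 2 and fy - 2 <= jmin and jmax <= fy + 2
--                for fx, fy in faros)
-- ===== Notes on version B (the rewrite author's own statement) =====
-- stated objective: alternative
-- what changed: Instead of re-testing every faro against every submarine cell, B computes the submarines' bounding box in one pass (row-level first/last index of 1) and tests each faro once against the four box extremes, which is exact because Chebyshev coverage decouples per axis.
-- outside the precondition, e.g. on verificador_submarinos([[1], [0, 0, 0, 0, 1]], 1, [(0, 0)]): A returns True, B returns False
import Mathlib
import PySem

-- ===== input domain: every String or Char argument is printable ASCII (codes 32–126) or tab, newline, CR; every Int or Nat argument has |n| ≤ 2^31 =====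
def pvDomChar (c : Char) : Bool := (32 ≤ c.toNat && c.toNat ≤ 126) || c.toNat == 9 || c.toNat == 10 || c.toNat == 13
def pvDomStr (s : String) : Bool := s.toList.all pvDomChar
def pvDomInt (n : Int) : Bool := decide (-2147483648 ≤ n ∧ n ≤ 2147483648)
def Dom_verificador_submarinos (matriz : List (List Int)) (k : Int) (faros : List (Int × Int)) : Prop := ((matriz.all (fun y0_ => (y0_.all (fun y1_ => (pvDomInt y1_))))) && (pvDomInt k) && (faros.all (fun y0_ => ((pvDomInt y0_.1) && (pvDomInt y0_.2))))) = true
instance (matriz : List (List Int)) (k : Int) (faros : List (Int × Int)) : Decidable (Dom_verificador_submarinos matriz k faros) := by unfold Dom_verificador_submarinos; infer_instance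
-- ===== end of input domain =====

-- B replaces A's per-cell scan over all faros by a one-pass submarine bounding box
-- tested once per faro (objective: alternative).


-- ===== PORT A =====
def pvCubre (faro : Int × Int) (submarino : Int × Int) : Bool :=
  let rx := faro.1 - submarino.1
  let ry := faro.2 - submarino.2
  decide (max |rx| |ry| ≤ 2)

def verificador_submarinos (matriz : List (List Int)) (k : Int) (faros : List (Int × Int)) : Bool :=
  if decide (k < (faros.length : Int)) then false
  else
    let n : Int := matriz.length
    let m : Int := (PySem.List.pyGetD matriz 0 []).length
    (PySem.List.pyRange 0 n 1).all (fun i =>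
      (PySem.List.pyRange 0 m 1).all (fun j =>
        if PySem.List.pyGetD (PySem.List.pyGetD matriz i []) j 0 == 1 then
          faros.all (fun faro => pvCubre faro (i, j))
        else true))

-- ===== PORT B =====
def pvRowMerge (box : Option (Int × Int × Int × Int)) (i lo hi : Int) :
    Option (Int × Int × Int × Int) :=
  match box with
  | none => some (i, i, lo, hi)
  | some (imin, imax, jmin, jmax) => some (min imin i, max imax i, min jmin lo, max jmax hi)

def verificador_submarinos_alt (matriz : List (List Int)) (k : Int) (faros : List (Int × Int)) : Bool :=
  if decide (k < (faros.length : Int)) then false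
  else
    match (PySem.List.enumerate matriz).foldl
      (fun b p =>
        if p.2.contains 1 then
          pvRowMerge b p.1 (((PySem.List.index? p.2 1).getD 0 : Nat) : Int)
            ((p.2.length : Int) - 1 -
              (((PySem.List.index? ((PySem.List.slice? p.2 none none (-1)).getD []) 1).getD 0 : Nat) : Int))
        else b) none with
    | none => true
    | some (imin, imax, jmin, jmax) =>
        faros.all (fun f =>
          decide (f.1 - 2 ≤ imin ∧ imax ≤ f.1 + 2 ∧ f.2 - 2 ≤ jmin ∧ jmax ≤ f.2 + 2))

-- ===== PRECONDITION & SPEC =====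
-- A reads only the first len(matriz[0]) columns of each row, so Pre_ excludes (besides
-- the empty matrix, on which A raises IndexError unless len(faros) > k) the ragged inputs
-- where that matters: a row shorter than matriz[0] (A raises IndexError if it reaches it)
-- or a submarine beyond column len(matriz[0])-1 (A silently ignores it, B scans it).
def Pre_verificador_submarinos (matriz : List (List Int)) (k : Int) (faros : List (Int × Int)) : Prop :=
  (k < (faros.length : Int)) ∨
    (matriz ≠ [] ∧ ∀ row ∈ matriz, matriz.headI.length ≤ row.length ∧
      ∀ q ∈ PySem.List.enumerate row 0, q.1 < (matriz.headI.length : Int) ∨ q.2 ≠ 1)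
instance (matriz : List (List Int)) (k : Int) (faros : List (Int × Int)) : Decidable (Pre_verificador_submarinos matriz k faros) := by unfold Pre_verificador_submarinos; infer_instance
def pvWitness_verificador_submarinos : List (List Int) × Int × (List (Int × Int)) := ([[1, 0], [0, 0]], 1, [(0, 0)])

def Spec_verificador_submarinos (matriz : List (List Int)) (k : Int) (faros : List (Int × Int)) (out : Bool) : Prop := out = verificador_submarinos_alt matriz k faros
instance (matriz : List (List Int)) (k : Int) (faros : List (Int × Int)) (out : Bool) : Decidable (Spec_verificador_submarinos matriz k faros out) := by unfold Spec_verificador_submarinos; infer_instance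

-- ===== CLAIM (what is proved, stated in full; the proofs are below) =====
def Claim_equal_verificador_submarinos : Prop := ∀ (matriz : List (List Int)) (k : Int) (faros : List (Int × Int)), Dom_verificador_submarinos matriz k faros → Pre_verificador_submarinos matriz k faros → Spec_verificador_submarinos matriz k faros (verificador_submarinos matriz k faros)

-- ===== LEMMAS AND PROOFS =====
-- "faro f covers the whole box" test, as B applies it to the folded accumulator
def pvFaroOK (f : Int × Int) : Option (Int × Int × Int × Int) → Bool
  | none => true
  | some (imin, imax, jmin, jmax) =>
      decide (f.1 - 2 ≤ imin ∧ imax ≤ f.1 + 2 ∧ f.2 - 2 ≤ jmin ∧ jmax ≤ f.2 + 2)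

-- "faro f covers row i whose submarines span columns lo..hi"
def pvRowCov (f : Int × Int) (i lo hi : Int) : Bool :=
  decide (f.1 - 2 ≤ i ∧ i ≤ f.1 + 2 ∧ f.2 - 2 ≤ lo ∧ hi ≤ f.2 + 2)

lemma pvFaroOK_merge (f : Int × Int) (b : Option (Int × Int × Int × Int)) (i lo hi : Int) :
    pvFaroOK f (pvRowMerge b i lo hi) = (pvFaroOK f b && pvRowCov f i lo hi) := by
  rcases b with _ | ⟨imin, imax, jmin, jmax⟩
  · simp [pvRowMerge, pvFaroOK, pvRowCov]
  · simp only [pvRowMerge, pvFaroOK, pvRowCov]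
    apply Bool.eq_iff_iff.mpr
    simp
    omega

lemma pvIdxOf?_getD (l : List Int) (h : (1 : Int) ∈ l) :
    List.idxOf? 1 l = some (List.idxOf 1 l) := by
  simp [List.idxOf?, List.idxOf, List.findIdx?_eq_some_iff_findIdx_eq]
  exact h

lemma pvIdxOf_min (l : List Int) (m : Nat) (h : m < l.idxOf 1) (hm : m < l.length) :
    l[m] ≠ 1 := by
  have := List.not_of_lt_findIdx (p := (· == (1 : Int))) (xs := l) (i := m)
    (by simpa [List.idxOf] using h)
  simpa using this

lemma pvRowCov_eq_all (f : Int × Int) (i : Int) (fila : List Int) (h1 : (1 : Int) ∈ fila) :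
    pvRowCov f i ((fila.idxOf 1 : Nat) : Int)
        ((fila.length : Int) - 1 - ((fila.reverse.idxOf 1 : Nat) : Int))
      = (PySem.List.enumerate fila 0).all (fun q => q.2 != 1 || pvCubre f (i, q.1)) := by
  have h1r : (1 : Int) ∈ fila.reverse := by simpa using h1
  have hlo : fila.idxOf 1 < fila.length := List.idxOf_lt_length_of_mem h1
  have hlo1 : fila[fila.idxOf 1] = 1 := List.getElem_idxOf hlo
  have hr : fila.reverse.idxOf 1 < fila.length := by
    simpa using List.idxOf_lt_length_of_mem h1r
  have hhi1 : fila[fila.length - 1 - fila.reverse.idxOf 1]'(by omega) = 1 := by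
    have := List.getElem_idxOf (xs := fila.reverse) (x := (1 : Int)) (by simpa using hr)
    rwa [List.getElem_reverse] at this
  apply Bool.eq_iff_iff.mpr
  simp only [pvRowCov, List.all_eq_true, PySem.List.mem_enumerate_iff, decide_eq_true_eq]
  constructor
  · rintro ⟨c1, c2, c3, c4⟩ q ⟨a, ha, rfl⟩
    by_cases hc : fila[a] = 1
    · have hge : fila.idxOf 1 ≤ a := by
        by_contra hlt
        exact pvIdxOf_min fila a (by omega) ha hc
      have hle : a ≤ fila.length - 1 - fila.reverse.idxOf 1 := by
        by_contra hgt
        refine pvIdxOf_min fila.reverse (fila.length - 1 - a) (by omega) (by simp; omega) ?_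
        rw [List.getElem_reverse]
        have : fila.length - 1 - (fila.length - 1 - a) = a := by omega
        simp_rw [this]
        exact hc
      simp only [pvCubre]
      simp [hc, abs_le]
      omega
    · simp [hc]
  · intro h
    have hl := h ((fila.idxOf 1 : Nat), fila[fila.idxOf 1]) ⟨fila.idxOf 1, hlo, by simp⟩
    have hh := h ((fila.length - 1 - fila.reverse.idxOf 1 : Nat),
        fila[fila.length - 1 - fila.reverse.idxOf 1]'(by omega))
      ⟨fila.length - 1 - fila.reverse.idxOf 1, by omega, by simp⟩
    rw [hlo1] at hl
    rw [hhi1] at hh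
    simp only [pvCubre] at hl hh
    simp [abs_le] at hl hh
    omega

lemma pvFaroOK_fold (f : Int × Int) (matriz : List (List Int)) :
    ∀ (s : Int) (b : Option (Int × Int × Int × Int)),
    pvFaroOK f ((PySem.List.enumerate matriz s).foldl
        (fun b p =>
          if p.2.contains 1 then
            pvRowMerge b p.1 (((PySem.List.index? p.2 1).getD 0 : Nat) : Int)
              ((p.2.length : Int) - 1 -
                (((PySem.List.index? ((PySem.List.slice? p.2 none none (-1)).getD []) 1).getD 0 : Nat) : Int))
          else b) b)
      = (pvFaroOK f b &&
          (PySem.List.enumerate matriz s).all (fun p =>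
            (PySem.List.enumerate p.2).all (fun q => q.2 != 1 || pvCubre f (p.1, q.1)))) := by
  induction matriz with
  | nil => simp [PySem.List.enumerate_nil]
  | cons fila t ih =>
      intro s b
      rw [PySem.List.enumerate_cons]
      simp only [List.foldl_cons, List.all_cons, ih]
      by_cases hc : fila.contains 1
      · have h1 : (1 : Int) ∈ fila := List.contains_iff_mem.mp hc
        rw [if_pos hc]
        simp only [PySem.List.index?_eq_idxOf?, PySem.List.slice?_none_none_neg_one,
          Option.getD_some]
        rw [pvIdxOf?_getD fila h1, pvIdxOf?_getD fila.reverse (by simpa using h1)]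
        simp only [Option.getD_some, pvFaroOK_merge, pvRowCov_eq_all f s fila h1,
          Bool.and_assoc]
      · rw [if_neg hc]
        have hno : (PySem.List.enumerate fila 0).all
            (fun q => q.2 != 1 || pvCubre f (s, q.1)) = true := by
          rw [List.all_eq_true]
          intro q hq
          obtain ⟨a, ha, rfl⟩ := (PySem.List.mem_enumerate_iff _ _ _).mp hq
          have hne1 : fila[a] ≠ 1 := fun he => absurd (List.contains_iff_mem.mpr (he ▸ List.getElem_mem ha)) (by simpa using hc)
          simp [hne1]
        rw [hno, Bool.true_and]

lemma pvAlt_eq_all (matriz : List (List Int)) (k : Int) (faros : List (Int × Int))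
    (hk : ¬ k < (faros.length : Int)) :
    verificador_submarinos_alt matriz k faros
      = faros.all (fun f =>
          (PySem.List.enumerate matriz 0).all (fun p =>
            (PySem.List.enumerate p.2).all (fun q => q.2 != 1 || pvCubre f (p.1, q.1)))) := by
  have hall : ∀ f : Int × Int,
      pvFaroOK f ((PySem.List.enumerate matriz 0).foldl
        (fun b p =>
          if p.2.contains 1 then
            pvRowMerge b p.1 (((PySem.List.index? p.2 1).getD 0 : Nat) : Int)
              ((p.2.length : Int) - 1 -
                (((PySem.List.index? ((PySem.List.slice? p.2 none none (-1)).getD []) 1).getD 0 : Nat) : Int))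
          else b) none)
      = (PySem.List.enumerate matriz 0).all (fun p =>
          (PySem.List.enumerate p.2).all (fun q => q.2 != 1 || pvCubre f (p.1, q.1))) := by
    intro f; rw [pvFaroOK_fold]; simp [pvFaroOK]
  unfold verificador_submarinos_alt
  rw [if_neg (by simpa using hk)]
  generalize hbx : (PySem.List.enumerate matriz 0).foldl
      (fun b p =>
        if p.2.contains 1 then
          pvRowMerge b p.1 (((PySem.List.index? p.2 1).getD 0 : Nat) : Int)
            ((p.2.length : Int) - 1 -
              (((PySem.List.index? ((PySem.List.slice? p.2 none none (-1)).getD []) 1).getD 0 : Nat) : Int))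
        else b) none = bx
  rw [hbx] at hall
  rcases bx with _ | ⟨imin, imax, jmin, jmax⟩
  · symm; simp only [List.all_eq_true]
    intro f hf
    have h := hall f
    simpa [pvFaroOK] using h.symm
  · dsimp only
    refine List.all_congr rfl ?_
    intro f
    have h := hall f
    simpa [pvFaroOK] using h

lemma pvA_eq_all (matriz : List (List Int)) (k : Int) (faros : List (Int × Int))
    (hk : ¬ k < (faros.length : Int)) (hne : matriz ≠ [])
    (hrect : ∀ row ∈ matriz, matriz.headI.length ≤ row.length ∧
      ∀ q ∈ PySem.List.enumerate row 0, q.1 < (matriz.headI.length : Int) ∨ q.2 ≠ 1) :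
    verificador_submarinos matriz k faros
      = faros.all (fun f =>
          (PySem.List.enumerate matriz 0).all (fun p =>
            (PySem.List.enumerate p.2).all (fun q => q.2 != 1 || pvCubre f (p.1, q.1)))) := by
  have hm : (PySem.List.pyGetD matriz 0 ([] : List Int)).length = matriz.headI.length := by
    cases matriz with
    | nil => exact absurd rfl hne
    | cons a t => simp [PySem.List.pyGetD_zero]
  unfold verificador_submarinos
  rw [if_neg (by simpa using hk)]
  apply Bool.eq_iff_iff.mpr
  simp only [List.all_eq_true, PySem.List.mem_pyRange_one, PySem.List.mem_enumerate_iff]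
  constructor
  · rintro h f hf p ⟨a, ha, rfl⟩ q ⟨b, hb, rfl⟩
    by_cases hc : matriz[a][b] = 1
    · have hbm : (b : Int) < (PySem.List.pyGetD matriz 0 ([] : List Int)).length := by
        rw [hm]
        rcases (hrect matriz[a] (List.getElem_mem ha)).2 ((b : Int), matriz[a][b])
            ((PySem.List.mem_enumerate_iff _ _ _).mpr ⟨b, by simpa using hb, by simp⟩) with hlt | hne1
        · simpa using hlt
        · exact absurd hc hne1
      have h2 := h (a : Int) ⟨by positivity, by exact_mod_cast ha⟩ (b : Int) ⟨by positivity, hbm⟩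
      rw [PySem.List.pyGetD_eq_getElem matriz [] (by positivity) (by exact_mod_cast ha)] at h2
      simp only [Int.toNat_natCast] at h2
      have hbb : b < matriz[a].length := by simpa using hb
      simp only [PySem.List.pyGetD_eq_getElem matriz[a] (i := (b : Int)) 0 (by positivity)
        (by exact_mod_cast hbb), Int.toNat_natCast] at h2
      rw [if_pos (by simp [hc])] at h2
      simp only [List.all_eq_true] at h2
      simpa [hc] using h2 f hf
    · simp [bne, hc]
  · rintro h i ⟨hi0, hin⟩ j ⟨hj0, hjm⟩
    simp only [PySem.List.pyGetD_eq_getElem matriz [] hi0 hin]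
    have hjlen : j < (matriz[i.toNat].length : Int) := by
      have hle := (hrect matriz[i.toNat] (List.getElem_mem _)).1
      rw [hm] at hjm
      have : (matriz.headI.length : Int) ≤ (matriz[i.toNat].length : Int) := by exact_mod_cast hle
      omega
    simp only [PySem.List.pyGetD_eq_getElem matriz[i.toNat] 0 hj0 hjlen]
    by_cases hc : matriz[i.toNat][j.toNat] = 1
    · rw [if_pos (by simp [hc])]
      simp only [List.all_eq_true]
      intro faro hfaro
      have hiN : i.toNat < matriz.length := by omega
      have hjN : j.toNat < matriz[i.toNat].length := by omega
      have h2 := h faro hfaro (i, matriz[i.toNat]) ⟨i.toNat, hiN, by simp [Prod.ext_iff]; omega⟩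
        (j, matriz[i.toNat][j.toNat]) ⟨j.toNat, hjN, by simp [Prod.ext_iff]; omega⟩
      simpa [hc] using h2
    · rw [if_neg (by simp [hc])]

-- ===== VERDICT (by name: the statement is the Claim_ definition above) =====
theorem verificador_submarinos_spec : Claim_equal_verificador_submarinos := by
  intro matriz k faros _ hpre
  unfold Spec_verificador_submarinos
  by_cases hk : k < (faros.length : Int)
  · simp [verificador_submarinos, verificador_submarinos_alt, hk]
  · rcases hpre with hk' | ⟨hne, hrect⟩
    · exact absurd hk' hk
    · rw [pvA_eq_all matriz k faros hk hne hrect, pvAlt_eq_all matriz k faros hk]
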